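-- pv_equiv track=rewrite | github.com/ghawkes1217/Conjectures-and-Computations | c-grothendieck/c-grothendieck-strongest.py | hook
-- ===== SOURCE A (Python) =====
-- def hook(A):
--     good=False
--     if len(A)>0:
--         good=True
--         mindex=0
--         for i in range(0,len(A)):
--             if A[i]==min(A):
--                 mindex=i
--         for i in range(0,mindex):
--             if A[i]<=A[i+1]:
--                 return(False)
--         for i in range(mindex,len(A)-1):
--             if A[i]>=A[i+1]:
--                 return(False)
--     return(good)
-- ===== SOURCE B (Python) =====
-- def _advance(A, i, cmp):
--     # advance cursor while next step exists and cmp holds on the adjacent pair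
--     while i < len(A) - 1 and cmp(A[i], A[i + 1]):
--         i += 1
--     return i
--
-- def hook(A):
--     if not A:
--         return False
--     i = _advance(A, 0, lambda x, y: x > y)   # strict descent phase
--     i = _advance(A, i, lambda x, y: x < y)   # strict ascent phase
--     return i == len(A) - 1
-- ===== Notes on version B (the rewrite author's own statement) =====
-- stated objective: simpler
-- what changed: Replaced the min(A)-in-a-loop argmin search plus two index-range checks by a single two-phase forward scan whose cursor discovers the pivot itself.
import Mathlib
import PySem

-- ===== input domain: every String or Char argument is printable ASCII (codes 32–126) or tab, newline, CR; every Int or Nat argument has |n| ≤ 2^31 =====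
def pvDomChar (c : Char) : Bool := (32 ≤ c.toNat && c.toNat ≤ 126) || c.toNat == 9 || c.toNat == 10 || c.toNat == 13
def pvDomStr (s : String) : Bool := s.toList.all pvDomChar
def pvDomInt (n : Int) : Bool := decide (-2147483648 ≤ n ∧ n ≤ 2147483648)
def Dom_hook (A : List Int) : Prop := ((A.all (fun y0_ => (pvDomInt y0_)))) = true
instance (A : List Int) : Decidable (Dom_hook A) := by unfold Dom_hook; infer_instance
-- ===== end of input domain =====

-- B replaces A's quadratic argmin-of-min search and index-range checks by one linear two-phase scan (return value only; neither mutates A).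

-- ===== PORT A =====
-- literal port: find last index whose value equals min(A), then check strict descent before it and strict ascent after it
def hook (A : List Int) : Bool :=
  if A.length > 0 then
    match PySem.List.min? A (fun x => x) with
    | none => false  -- unreachable: A nonempty
    | some mn =>
      let mindex := (List.range A.length).foldl (fun m i => if A.getD i 0 = mn then i else m) 0
      if (List.range mindex).all (fun i => decide (A.getD i 0 > A.getD (i+1) 0)) then
        (List.range (A.length - 1 - mindex)).all
          (fun j => decide (A.getD (mindex + j) 0 < A.getD (mindex + j + 1) 0))
      else false
  else false

-- ===== PORT B =====
-- _advance: move the cursor forward while the adjacent pair satisfies cmp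
def advance (A : List Int) (cmp : Int → Int → Bool) (i : Nat) : Nat :=
  if h : i < A.length - 1 ∧ cmp (A.getD i 0) (A.getD (i+1) 0) then
    advance A cmp (i+1)
  else i
termination_by A.length - 1 - i
decreasing_by omega

def hook_alt (A : List Int) : Bool :=
  if A = [] then false
  else
    let i := advance A (fun x y => decide (x > y)) 0
    let j := advance A (fun x y => decide (x < y)) i
    decide (j = A.length - 1)

-- ===== PRECONDITION & SPEC =====
def Spec_hook (A : List Int) (out : Bool) : Prop := out = hook_alt A
instance (A : List Int) (out : Bool) : Decidable (Spec_hook A out) := by unfold Spec_hook; infer_instance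

-- ===== CLAIM (what is proved, stated in full; the proofs are below) =====
def Claim_equal_hook : Prop := ∀ (A : List Int), Dom_hook A → Spec_hook A (hook A)

-- ===== LEMMAS AND PROOFS =====

theorem advance_le (A : List Int) (cmp : Int → Int → Bool) (i : Nat) (hi : i ≤ A.length - 1) :
    advance A cmp i ≤ A.length - 1 := by
  induction i using advance.induct A cmp with
  | case1 i h ih => rw [advance, dif_pos h]; exact ih (by omega)
  | case2 i h => rw [advance, dif_neg h]; exact hi

theorem advance_inv (A : List Int) (cmp : Int → Int → Bool) (i : Nat) :
    ∀ k, i ≤ k → k < advance A cmp i → cmp (A.getD k 0) (A.getD (k+1) 0) = true := by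
  induction i using advance.induct A cmp with
  | case1 i h ih =>
    intro k hk1 hk2
    rw [advance, dif_pos h] at hk2
    rcases Nat.eq_or_lt_of_le hk1 with rfl | hlt
    · exact h.2
    · exact ih k hlt hk2
  | case2 i h =>
    intro k hk1 hk2
    rw [advance, dif_neg h] at hk2
    omega

theorem advance_eq (A : List Int) (cmp : Int → Int → Bool) (i t : Nat)
    (hit : i ≤ t) (ht : t ≤ A.length - 1)
    (hall : ∀ k, i ≤ k → k < t → cmp (A.getD k 0) (A.getD (k+1) 0) = true)
    (hstop : t = A.length - 1 ∨ cmp (A.getD t 0) (A.getD (t+1) 0) = false) :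
    advance A cmp i = t := by
  induction i using advance.induct A cmp with
  | case1 i hc ih =>
    rw [advance, dif_pos hc]
    have hit' : i + 1 ≤ t := by
      rcases Nat.eq_or_lt_of_le hit with rfl | hlt
      · rcases hstop with h1 | h2
        · omega
        · rw [hc.2] at h2; cases h2
      · omega
    exact ih hit' (fun k hk1 hk2 => hall k (by omega) hk2)
  | case2 i hc =>
    rw [advance, dif_neg hc]
    rcases Nat.eq_or_lt_of_le hit with rfl | hlt
    · rfl
    · exfalso; exact hc ⟨by omega, hall i le_rfl hlt⟩

-- strict-descent chain
theorem chain_gt (A : List Int) (s t : Nat)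
    (h : ∀ k, s ≤ k → k < t → A.getD k 0 > A.getD (k+1) 0) :
    ∀ i j, s ≤ i → i < j → j ≤ t → A.getD i 0 > A.getD j 0 := by
  intro i j hsi hij hjt
  induction j with
  | zero => omega
  | succ j ih =>
    rcases Nat.eq_or_lt_of_le (Nat.succ_le_of_lt hij) with h1 | h2
    · exact h1 ▸ h i (by omega) (by omega)
    · exact lt_trans (h j (by omega) (by omega)) (ih (by omega) (by omega))

-- strict-ascent chain
theorem chain_lt (A : List Int) (s t : Nat)
    (h : ∀ k, s ≤ k → k < t → A.getD k 0 < A.getD (k+1) 0) :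
    ∀ i j, s ≤ i → i < j → j ≤ t → A.getD i 0 < A.getD j 0 := by
  intro i j hsi hij hjt
  induction j with
  | zero => omega
  | succ j ih =>
    rcases Nat.eq_or_lt_of_le (Nat.succ_le_of_lt hij) with h1 | h2
    · exact h1 ▸ h i (by omega) (by omega)
    · exact lt_trans (ih (by omega) (by omega)) (h j (by omega) (by omega))

-- the argmin fold stays below n
theorem fold_lt (A : List Int) (mn : Int) (n : Nat) (hn : 0 < n) :
    (List.range n).foldl (fun m i => if A.getD i 0 = mn then i else m) 0 < n := by
  induction n with
  | zero => omega
  | succ n ih =>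
    rw [List.range_succ, List.foldl_append]
    simp only [List.foldl_cons, List.foldl_nil]
    split
    · omega
    · rcases Nat.eq_zero_or_pos n with rfl | hpos
      · simp
      · exact lt_trans (ih hpos) (by omega)

-- with a unique index achieving mn, the last-argmin fold returns it
theorem fold_unique (A : List Int) (mn : Int) (n p : Nat) (hp : p < n)
    (hpred : ∀ i, i < n → (A.getD i 0 = mn ↔ i = p)) :
    (List.range n).foldl (fun m i => if A.getD i 0 = mn then i else m) 0 = p := by
  induction n with
  | zero => omega
  | succ n ih =>
    rw [List.range_succ, List.foldl_append]
    simp only [List.foldl_cons, List.foldl_nil]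
    rcases Nat.eq_or_lt_of_le (Nat.succ_le_of_lt hp) with h1 | h2
    · rw [if_pos ((hpred n (by omega)).mpr (by omega))]; omega
    · rw [if_neg (fun hc => by have := (hpred n (by omega)).mp hc; omega)]
      exact ih (by omega) (fun i hi => hpred i (by omega))

theorem getD_mem (A : List Int) (i : Nat) (hi : i < A.length) : A.getD i 0 ∈ A := by
  rw [List.getD_eq_getElem A 0 hi]; exact List.getElem_mem hi

theorem mem_getD (A : List Int) (x : Int) (hx : x ∈ A) : ∃ i, i < A.length ∧ A.getD i 0 = x := by
  rcases List.getElem_of_mem hx with ⟨i, hi, hx⟩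
  exact ⟨i, hi, by rw [List.getD_eq_getElem A 0 hi]; exact hx⟩

-- B = true → A = true
theorem alt_imp (A : List Int) (h : hook_alt A = true) : hook A = true := by
  unfold hook_alt at h
  rcases eq_or_ne A [] with rfl | hne
  · simp at h
  rw [if_neg hne] at h
  simp only [decide_eq_true_eq] at h
  have hn : 0 < A.length := List.length_pos_iff.mpr hne
  set p := advance A (fun x y => decide (x > y)) 0 with hpdef
  have hp0 : (0:Nat) ≤ p := Nat.zero_le _
  have hple : p ≤ A.length - 1 := advance_le A _ 0 (by omega)
  have hdesc : ∀ k, k < p → A.getD k 0 > A.getD (k+1) 0 := by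
    intro k hk
    have := advance_inv A (fun x y => decide (x > y)) 0 k (Nat.zero_le _) hk
    simpa using this
  have hasc : ∀ k, p ≤ k → k < A.length - 1 → A.getD k 0 < A.getD (k+1) 0 := by
    intro k hk1 hk2
    have := advance_inv A (fun x y => decide (x < y)) p k hk1 (h ▸ hk2)
    simpa using this
  -- A[p] is the unique minimum
  have hmin : ∀ i, i < A.length → i ≠ p → A.getD p 0 < A.getD i 0 := by
    intro i hi hip
    rcases Nat.lt_or_ge i p with hlt | hge
    · exact chain_gt A 0 p (fun k _ hk => hdesc k hk) i p (Nat.zero_le _) hlt le_rfl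
    · exact chain_lt A p (A.length - 1) hasc p i le_rfl (by omega) (by omega)
  unfold hook
  rw [if_pos hn]
  obtain ⟨mn, hmn⟩ : ∃ mn, PySem.List.min? A (fun x => x) = some mn := by
    cases hm : PySem.List.min? A (fun x => x) with
    | none => exact absurd ((PySem.List.min?_eq_none_iff A _).mp hm) hne
    | some m => exact ⟨m, rfl⟩
  rw [hmn]
  dsimp only
  -- mn = A.getD p 0
  have hmnval : mn = A.getD p 0 := by
    have h1 : mn ≤ A.getD p 0 := PySem.List.min?_isMin hmn _ (getD_mem A p (by omega))
    rcases mem_getD A mn (PySem.List.min?_mem hmn) with ⟨i, hi, hiv⟩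
    rcases eq_or_ne i p with rfl | hip
    · omega
    · have := hmin i hi hip; omega
  have hfold : (List.range A.length).foldl (fun m i => if A.getD i 0 = mn then i else m) 0 = p := by
    refine fold_unique A mn A.length p (by omega) (fun i hi => ⟨fun hc => ?_, fun hc => by rw [hc, hmnval]⟩)
    by_contra hip
    have := hmin i hi hip
    omega
  simp only [hfold]
  rw [if_pos]
  · simp only [List.all_eq_true, List.mem_range, decide_eq_true_eq]
    intro j hj
    exact hasc (p + j) (by omega) (by omega)
  · simp only [List.all_eq_true, List.mem_range, decide_eq_true_eq]
    intro k hk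
    exact hdesc k hk

-- A = true → B = true
theorem main_imp (A : List Int) (h : hook A = true) : hook_alt A = true := by
  unfold hook at h
  by_cases hn : A.length > 0
  swap
  · rw [if_neg hn] at h; cases h
  rw [if_pos hn] at h
  have hne : A ≠ [] := by intro hc; rw [hc] at hn; simp at hn
  obtain ⟨mn, hmn⟩ : ∃ mn, PySem.List.min? A (fun x => x) = some mn := by
    cases hm : PySem.List.min? A (fun x => x) with
    | none => exact absurd ((PySem.List.min?_eq_none_iff A _).mp hm) hne
    | some m => exact ⟨m, rfl⟩
  rw [hmn] at h
  dsimp only at h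
  set p := (List.range A.length).foldl (fun m i => if A.getD i 0 = mn then i else m) 0 with hpdef
  have hplt : p < A.length := fold_lt A mn A.length hn
  by_cases hc1 : (List.range p).all (fun i => decide (A.getD i 0 > A.getD (i+1) 0)) = true
  swap
  · rw [if_neg hc1] at h; cases h
  rw [if_pos hc1] at h
  simp only [List.all_eq_true, List.mem_range, decide_eq_true_eq] at hc1 h
  have hdesc : ∀ k, k < p → A.getD k 0 > A.getD (k+1) 0 := hc1
  have hasc : ∀ k, p ≤ k → k < A.length - 1 → A.getD k 0 < A.getD (k+1) 0 := by
    intro k hk1 hk2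
    have := h (k - p) (by omega)
    have hkp : p + (k - p) = k := by omega
    rw [hkp] at this
    exact this
  unfold hook_alt
  rw [if_neg hne]
  dsimp only
  have h1 : advance A (fun x y => decide (x > y)) 0 = p := by
    refine advance_eq A _ 0 p (Nat.zero_le _) (by omega) ?_ ?_
    · intro k _ hk; simpa using hdesc k hk
    · by_cases hpe : p = A.length - 1
      · exact Or.inl hpe
      · refine Or.inr ?_
        have := hasc p le_rfl (by omega)
        simp only [decide_eq_false_iff_not]
        omega
  have h2 : advance A (fun x y => decide (x < y)) p = A.length - 1 := by
    refine advance_eq A _ p (A.length - 1) (by omega) le_rfl ?_ (Or.inl rfl)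
    intro k hk1 hk2; simpa using hasc k hk1 hk2
  rw [h1, h2]
  simp

-- ===== VERDICT (by name: the statement is the Claim_ definition above) =====
theorem hook_spec : Claim_equal_hook := by
  intro A _
  unfold Spec_hook
  cases hA : hook A with
  | true => exact (main_imp A hA).symm
  | false =>
    cases hB : hook_alt A with
    | true => rw [alt_imp A hB] at hA; cases hA
    | false => rfl
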